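-- pv_equiv track=rewrite | github.com/mischiefsleep/Den-Core-2019 | Crypto/block/block_cipher.py | generate_permutation
-- ===== SOURCE A (Python) =====
-- def generate_permutation(key):
--     '''
--     This function will take a key string as input, generate a dictionary of key:value pairs where the keys are the letters in the ordered key string and the values are arrays containing the list
--     '''
--     ordered_key=sorted(key) # we sort the key string alphabetically in order to retrieve the indexes
--     index_map={} # initially we don't have any index stored
--     for i in range(len(key)): # we look at every letter in the key
--         if ordered_key[i] in index_map.keys(): # if we already have encountered the letter then we can just append the current index of the letter to the list of indexes of ots occurences
--             index_map[ordered_key[i]].append(i)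
--         else:
--             index_map[ordered_key[i]]=[i] # otherwise we have to initilize the list of indexes with the current index
--     index_array=[] # we want to put the indexes in correct order so we need an array
--     for letter in key:
--         index_array.append(index_map[letter].pop()) # this takes the last index in the list of indexes associated to the letter and puts it in the correct place in the permutation array
--     return(index_array)
-- ===== SOURCE B (Python) =====
-- def generate_permutation(key):
--     counts = {}
--     for x in key:
--         counts[x] = counts.get(x, 0) + 1
--     start = {}
--     acc = 0
--     for c in sorted(counts):
--         start[c] = acc
--         acc += counts[c]
--     seen = {}
--     result = []
--     for c in key:
--         k = seen.get(c, 0)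
--         seen[c] = k + 1
--         result.append(start[c] + counts[c] - 1 - k)
--     return result
-- ===== Notes on version B (the rewrite author's own statement) =====
-- stated objective: alternative
-- what changed: B drops A's full sort, position-bucket dict and pop-from-end: it counts char multiplicities, prefix-sums them over the sorted distinct chars, and assigns each position (chars strictly smaller anywhere) + (equal chars strictly later) via a running duplicate counter, which reproduces A's tie-breaking exactly.
import Mathlib
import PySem

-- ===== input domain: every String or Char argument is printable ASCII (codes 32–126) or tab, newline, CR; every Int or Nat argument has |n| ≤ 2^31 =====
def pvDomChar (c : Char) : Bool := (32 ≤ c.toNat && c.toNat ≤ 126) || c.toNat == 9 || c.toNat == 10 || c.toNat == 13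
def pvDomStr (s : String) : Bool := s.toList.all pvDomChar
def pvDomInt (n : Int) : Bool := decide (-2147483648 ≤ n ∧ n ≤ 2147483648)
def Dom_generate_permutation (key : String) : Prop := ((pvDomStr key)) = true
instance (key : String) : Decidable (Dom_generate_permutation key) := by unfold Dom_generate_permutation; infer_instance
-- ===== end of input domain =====

-- B replaces A's sort of all n chars + position-bucket dict + pop with counting-sort style
-- arithmetic: char multiplicities, prefix sums over the sorted distinct chars, and a running
-- duplicate counter; objective: alternative (sorts only the distinct chars).

-- ===== PORT A =====
def generate_permutation (key : String) : List Int :=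
  let l := key.toList
  let ordered_key := PySem.List.sorted l (fun x => x)
  let index_map : PySem.Dict Char (List Int) :=
    (PySem.List.pyRange 0 (PySem.List.len l)).foldl
      (fun m i =>
        let c := PySem.List.pyGetD ordered_key i ' '   -- ordered_key[i]; i is always in range here
        if m.contains c then m.modify c [] (fun ixs => ixs ++ [i])  -- index_map[ordered_key[i]].append(i)
        else m.insert c [i])
      PySem.Dict.empty
  let st := l.foldl
    (fun (st : PySem.Dict Char (List Int) × List Int) letter =>
      -- index_map[letter].pop(): every letter of key has a nonempty bucket, so the
      -- none branch (Python's KeyError/IndexError) is unreachable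
      match PySem.List.pop? (st.1.getD letter []) with
      | some (v, rest) => (st.1.insert letter rest, st.2 ++ [v])
      | none => (st.1, st.2 ++ [0]))
    (index_map, [])
  st.2

-- ===== PORT B =====
def generate_permutation_alt (key : String) : List Int :=
  let l := key.toList
  let counts : PySem.Dict Char Int :=
    l.foldl (fun d x => d.insert x (d.getD x 0 + 1)) PySem.Dict.empty   -- counts[x] = counts.get(x, 0) + 1
  let startp := (PySem.List.sorted counts.keys (fun c => c)).foldl     -- for c in sorted(counts)
      (fun (st : PySem.Dict Char Int × Int) c => (st.1.insert c st.2, st.2 + counts.getD c 0))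
      (PySem.Dict.empty, 0)
  let start := startp.1
  let rp := l.foldl
      (fun (st : PySem.Dict Char Int × List Int) c =>
        let k := st.1.getD c 0                                          -- k = seen.get(c, 0)
        (st.1.insert c (k + 1), st.2 ++ [start.getD c 0 + counts.getD c 0 - 1 - k]))
      (PySem.Dict.empty, [])
  rp.2

-- ===== PRECONDITION & SPEC =====
def Spec_generate_permutation (key : String) (out : List Int) : Prop := out = generate_permutation_alt key
instance (key : String) (out : List Int) : Decidable (Spec_generate_permutation key out) := by unfold Spec_generate_permutation; infer_instance

-- ===== CLAIM (what is proved, stated in full; the proofs are below) =====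
def Claim_equal_generate_permutation : Prop := ∀ (key : String), Dom_generate_permutation key → Spec_generate_permutation key (generate_permutation key)

-- ===== LEMMAS AND PROOFS =====

-- the common value both programs compute: the char c at a position with suffix r is sent to
-- #{x ∈ key | x < c} + #{x ∈ r | x = c}
def pvMid (s : Char → Int) : List Char → List Int
  | [] => []
  | c :: r => (s c + (r.count c : Int)) :: pvMid s r

theorem pvMid_congr (s₁ s₂ : Char → Int) :
    ∀ (t : List Char), (∀ c ∈ t, s₁ c = s₂ c) → pvMid s₁ t = pvMid s₂ t := by
  intro t
  induction t with
  | nil => intro _; rfl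
  | cons c r ih =>
    intro h
    simp only [pvMid, h c List.mem_cons_self,
      ih (fun c' hc' => h c' (List.mem_cons_of_mem _ hc'))]

-- B's prefix-sum loop leaves untouched keys alone
theorem pv_start_notmem (g : Char → Int) :
    ∀ (ks : List Char) (D : PySem.Dict Char Int) (a : Int) (c : Char), c ∉ ks →
      ((ks.foldl (fun (st : PySem.Dict Char Int × Int) x => (st.1.insert x st.2, st.2 + g x))
        (D, a)).1).getD c 0 = D.getD c 0 := by
  intro ks
  induction ks with
  | nil => intro D a c _; rfl
  | cons x r ih =>
    intro D a c hc
    simp only [List.foldl_cons]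
    rw [ih _ _ _ (fun h => hc (List.mem_cons_of_mem _ h)),
      PySem.Dict.getD_insert_of_ne (hne := fun h : c = x => hc (h ▸ List.mem_cons_self))]

-- B's prefix-sum loop over a strictly increasing key list
theorem pv_start (g : Char → Int) :
    ∀ (ks : List Char) (D : PySem.Dict Char Int) (a : Int) (c : Char),
      ks.Pairwise (· < ·) → c ∈ ks →
      ((ks.foldl (fun (st : PySem.Dict Char Int × Int) x => (st.1.insert x st.2, st.2 + g x))
        (D, a)).1).getD c 0
      = a + ((ks.filter (fun x => decide (x < c))).map g).sum := by
  intro ks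
  induction ks with
  | nil => intro D a c _ hc; cases hc
  | cons x r ih =>
    intro D a c hp hc
    rcases List.pairwise_cons.mp hp with ⟨hx, hr⟩
    simp only [List.foldl_cons]
    by_cases h : c = x
    · subst h
      have hnot : c ∉ r := fun hm => lt_irrefl c (hx c hm)
      rw [pv_start_notmem g r _ _ _ hnot, PySem.Dict.getD_insert_self]
      have hfilt : (c :: r).filter (fun y => decide (y < c)) = [] := by
        apply List.filter_eq_nil_iff.mpr
        intro y hy
        rcases List.mem_cons.mp hy with rfl | hm
        · simp
        · simpa using not_lt_of_gt (hx y hm)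
      rw [hfilt]; simp
    · have hxc : x < c := hx c (List.mem_cons.mp hc |>.resolve_left h)
      rw [ih _ _ _ hr (List.mem_cons.mp hc |>.resolve_left h)]
      rw [List.filter_cons, if_pos (by simpa using hxc)]
      simp [add_assoc]

-- summing per-char multiplicities over a duplicate-free char list counts the members
theorem pv_sum_counts :
    ∀ (D : List Char) (l : List Char), D.Nodup →
      ((D.map (fun d => (l.count d : Int))).sum) = (l.countP (fun x => decide (x ∈ D)) : Int) := by
  intro D
  induction D with
  | nil => intro l _; simp
  | cons d R ih =>
    intro l hnd
    rcases List.nodup_cons.mp hnd with ⟨hd, hR⟩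
    have hsplit : l.countP (fun x => decide (x ∈ d :: R))
        = l.countP (fun x => x == d) + l.countP (fun x => decide (x ∈ R)) := by
      induction l with
      | nil => simp
      | cons y t iht =>
        by_cases hy : y = d
        · subst hy
          rw [List.countP_cons_of_pos (by simp), List.countP_cons_of_pos (by simp),
            List.countP_cons_of_neg (by simpa using hd)]
          omega
        · by_cases hyR : y ∈ R
          · rw [List.countP_cons_of_pos (by simp [hyR]), List.countP_cons_of_neg (by simpa using hy),
              List.countP_cons_of_pos (by simpa using hyR)]
            omega
          · rw [List.countP_cons_of_neg (by simp [hy, hyR]), List.countP_cons_of_neg (by simpa using hy),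
              List.countP_cons_of_neg (by simpa using hyR)]
            exact iht
    rw [List.map_cons, List.sum_cons, ih l hR, hsplit, List.count_eq_countP]
    push_cast
    ring

-- B's final loop: 'seen' counts earlier duplicates, so each char gets s₀ + (equal chars later)
theorem pv_loop3 (s0 g : Char → Int) :
    ∀ (t : List Char) (seen : PySem.Dict Char Int) (acc : List Int),
      (∀ c ∈ t, g c - seen.getD c 0 = (t.count c : Int)) →
      (t.foldl
        (fun (st : PySem.Dict Char Int × List Int) c =>
          (st.1.insert c (st.1.getD c 0 + 1), st.2 ++ [s0 c + g c - 1 - st.1.getD c 0]))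
        (seen, acc)).2 = acc ++ pvMid s0 t := by
  intro t
  induction t with
  | nil => intro seen acc _; simp [pvMid]
  | cons c r ih =>
    intro seen acc hD
    have hc := hD c List.mem_cons_self
    rw [List.count_cons_self] at hc
    simp only [List.foldl_cons]
    have hhead : s0 c + g c - 1 - seen.getD c 0 = s0 c + (r.count c : Int) := by
      push_cast at hc ⊢
      omega
    rw [hhead, ih (seen.insert c (seen.getD c 0 + 1)) (acc ++ [s0 c + (r.count c : Int)]) ?_]
    · simp [pvMid]
    · intro c' hc'
      by_cases h : c' = c
      · subst h
        rw [PySem.Dict.getD_insert_self]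
        push_cast at hc ⊢
        omega
      · rw [PySem.Dict.getD_insert_of_ne (hne := h),
          hD c' (List.mem_cons_of_mem _ hc'), List.count_cons_of_ne (fun hcc => h hcc.symm)]

-- a ≤-sorted list splits as (everything < c) ++ (everything = c) ++ (everything > c)
theorem pv_sorted_split (c : Char) :
    ∀ (l : List Char), l.Pairwise (· ≤ ·) →
      l = l.filter (fun x => decide (x < c)) ++ l.filter (fun x => x == c)
          ++ l.filter (fun x => decide (c < x)) := by
  intro l hl
  induction l with
  | nil => rfl
  | cons a t ih =>
    rcases List.pairwise_cons.mp hl with ⟨ha, ht⟩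
    rcases lt_trichotomy a c with h | h | h
    · simp only [List.filter_cons, decide_eq_true_eq]
      rw [if_pos (by simpa using h), if_neg (by simp [ne_of_lt h]), if_neg (by simp [not_lt_of_gt h])]
      simpa using ih ht
    · subst h
      have h1 : t.filter (fun x => decide (x < a)) = [] :=
        List.filter_eq_nil_iff.mpr (fun y hy => by simpa using not_lt_of_ge (ha y hy))
      have := ih ht
      rw [h1] at this
      simp only [List.filter_cons]
      rw [if_neg (by simp), if_pos (by simp), if_neg (by simp), h1]
      simpa using this
    · have hall : ∀ y ∈ t, c < y := fun y hy => lt_of_lt_of_le h (ha y hy)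
      have h1 : t.filter (fun x => decide (x < c)) = [] :=
        List.filter_eq_nil_iff.mpr (fun y hy => by simpa using not_lt_of_gt (hall y hy))
      have h2 : t.filter (fun x => x == c) = [] :=
        List.filter_eq_nil_iff.mpr (fun y hy => by simpa using ne_of_gt (hall y hy))
      have h3 : t.filter (fun x => decide (c < x)) = t :=
        List.filter_eq_self.mpr (fun y hy => by simpa using hall y hy)
      simp only [List.filter_cons]
      rw [if_neg (by simp [not_lt_of_gt h]), if_neg (by simp [ne_of_gt h]), if_pos (by simpa using h), h1, h2, h3]
      simp

-- in a sorted list, the positions holding c are the contiguous range starting after the smaller chars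
theorem pv_bucket (ord : List Char) (hs : ord.Pairwise (· ≤ ·)) (c : Char) :
    (List.map (fun p => p.1) ((PySem.List.enumerate ord).filter (fun p => p.2 == c)))
      = PySem.List.pyRange ((ord.filter (fun x => decide (x < c))).length : Int)
          (((ord.filter (fun x => decide (x < c))).length : Int) + (ord.count c : Int)) := by
  set A := ord.filter (fun x => decide (x < c)) with hA
  set B := ord.filter (fun x => x == c) with hB
  set C := ord.filter (fun x => decide (c < x)) with hC
  have hsplit := pv_sorted_split c ord hs
  have hcnt : ord.count c = B.length := by
    rw [List.count_eq_length_filter]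
  have hfA : (PySem.List.enumerate A 0).filter (fun p => p.2 == c) = [] := by
    apply List.filter_eq_nil_iff.mpr
    intro p hp
    rcases (PySem.List.mem_enumerate_iff _ _ _).mp hp with ⟨k, hk, rfl⟩
    have : A[k] ∈ A := List.getElem_mem hk
    have := List.of_mem_filter this
    simp only [decide_eq_true_eq] at this
    simp [ne_of_lt this]
  have hfB : ∀ s : Int, (PySem.List.enumerate B s).filter (fun p => p.2 == c) = PySem.List.enumerate B s := by
    intro s
    apply List.filter_eq_self.mpr
    intro p hp
    rcases (PySem.List.mem_enumerate_iff _ _ _).mp hp with ⟨k, hk, rfl⟩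
    have : B[k] ∈ B := List.getElem_mem hk
    have := List.of_mem_filter this
    simpa using this
  have hfC : ∀ s : Int, (PySem.List.enumerate C s).filter (fun p => p.2 == c) = [] := by
    intro s
    apply List.filter_eq_nil_iff.mpr
    intro p hp
    rcases (PySem.List.mem_enumerate_iff _ _ _).mp hp with ⟨k, hk, rfl⟩
    have : C[k] ∈ C := List.getElem_mem hk
    have := List.of_mem_filter this
    simp only [decide_eq_true_eq] at this
    simp [(ne_of_gt this)]
  calc (List.map (fun p => p.1) ((PySem.List.enumerate ord).filter (fun p => p.2 == c)))
      = (List.map (fun p => p.1) ((PySem.List.enumerate (A ++ B ++ C)).filter (fun p => p.2 == c))) := by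
        rw [← hsplit]
    _ = PySem.List.pyRange (A.length : Int) ((A.length : Int) + (B.length : Int)) := by
        rw [show ((A ++ B ++ C) : List Char) = A ++ (B ++ C) by simp,
            PySem.List.enumerate_append, PySem.List.enumerate_append,
            List.filter_append, List.filter_append, hfA, hfB, hfC]
        simp [PySem.List.map_fst_enumerate]
    _ = _ := by rw [hcnt]

-- A's first loop builds, for each char c, the list of positions of ord that hold c
theorem pv_loop1 (ord : List Char) (c : Char) :
    ((PySem.List.pyRange 0 (PySem.List.len ord)).foldl
      (fun m i =>
        let x := PySem.List.pyGetD ord i ' '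
        if m.contains x then m.modify x [] (fun ixs => ixs ++ [i]) else m.insert x [i])
      (PySem.Dict.empty : PySem.Dict Char (List Int))).getD c []
    = List.map (fun p => p.1) ((PySem.List.enumerate ord).filter (fun p => p.2 == c)) := by
  have hbody : ∀ (m : PySem.Dict Char (List Int)) (x : Char) (i : Int),
      (if m.contains x then m.modify x [] (fun ixs => ixs ++ [i]) else m.insert x [i])
        = m.modify x [] (fun ixs => ixs ++ [i]) := by
    intro m x i
    by_cases h : m.contains x = true
    · rw [if_pos h]
    · rw [if_neg h, PySem.Dict.modify,
        PySem.Dict.getD_of_not_contains (h := by simpa using h)]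
      simp
  have h1 : ((PySem.List.pyRange 0 (PySem.List.len ord)).foldl
      (fun m i =>
        let x := PySem.List.pyGetD ord i ' '
        if m.contains x then m.modify x [] (fun ixs => ixs ++ [i]) else m.insert x [i])
      (PySem.Dict.empty : PySem.Dict Char (List Int)))
    = ((PySem.List.pyRange 0 (PySem.List.len ord)).foldl
      (fun m i => m.modify (PySem.List.pyGetD ord i ' ') [] (fun ixs => ixs ++ [i]))
      (PySem.Dict.empty : PySem.Dict Char (List Int))) := by
    apply PySem.List.foldl_congr_mem
    intro acc i _
    simpa using hbody acc (PySem.List.pyGetD ord i ' ') i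
  rw [h1]
  have h2 : (PySem.List.pyRange 0 (PySem.List.len ord)).foldl
      (fun m i => m.modify (PySem.List.pyGetD ord i ' ') [] (fun ixs => ixs ++ [i]))
      (PySem.Dict.empty : PySem.Dict Char (List Int))
    = ((PySem.List.enumerate ord).map Prod.swap).foldl
      (fun m p => m.modify p.1 [] (fun ixs => ixs ++ [p.2]))
      (PySem.Dict.empty : PySem.Dict Char (List Int)) := by
    rw [PySem.List.enumerate_eq_map_pyRange (d := ' '), List.map_map, List.foldl_map]
    rfl
  rw [h2, PySem.Dict.getD_foldl_modify_append]
  simp [List.filter_map, List.map_map, Function.comp_def, Prod.swap]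

-- A's second loop, under the invariant that every still-needed bucket is a contiguous range
theorem pv_loop2 :
    ∀ (t : List Char) (D : PySem.Dict Char (List Int)) (acc : List Int) (s : Char → Int),
      (∀ c ∈ t, D.getD c [] = PySem.List.pyRange (s c) (s c + (t.count c : Int))) →
      (t.foldl
        (fun (st : PySem.Dict Char (List Int) × List Int) letter =>
          match PySem.List.pop? (st.1.getD letter []) with
          | some (v, rest) => (st.1.insert letter rest, st.2 ++ [v])
          | none => (st.1, st.2 ++ [0]))
        (D, acc)).2 = acc ++ pvMid s t := by
  intro t
  induction t with
  | nil => intro D acc s _; simp [pvMid]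
  | cons c r ih =>
    intro D acc s hD
    have hbucket : D.getD c [] = PySem.List.pyRange (s c) (s c + ((c :: r).count c : Int)) :=
      hD c List.mem_cons_self
    have hcount : ((c :: r).count c : Int) = (r.count c : Int) + 1 := by
      rw [List.count_cons_self]; push_cast; ring
    have hsplit : PySem.List.pyRange (s c) (s c + ((c :: r).count c : Int))
        = PySem.List.pyRange (s c) (s c + (r.count c : Int)) ++ [s c + (r.count c : Int)] := by
      rw [hcount, show s c + ((r.count c : Int) + 1) = (s c + (r.count c : Int)) + 1 by ring]
      exact PySem.List.pyRange_one_succ_right (by omega)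
    have hpop : PySem.List.pop? (D.getD c []) =
        some (s c + (r.count c : Int), PySem.List.pyRange (s c) (s c + (r.count c : Int))) := by
      rw [hbucket, hsplit, PySem.List.pop?_last]
    simp only [List.foldl_cons, hpop]
    rw [ih (D.insert c (PySem.List.pyRange (s c) (s c + (r.count c : Int))))
        (acc ++ [s c + (r.count c : Int)]) s ?_]
    · simp [pvMid]
    · intro c' hc'
      by_cases h : c' = c
      · subst h
        rw [PySem.Dict.getD_insert_self]
      · rw [PySem.Dict.getD_insert_of_ne (hne := h),
          hD c' (List.mem_cons_of_mem _ hc'), List.count_cons_of_ne (fun hcc => h hcc.symm)]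

-- ===== VERDICT (by name: the statement is the Claim_ definition above) =====
theorem generate_permutation_spec : Claim_equal_generate_permutation := by
  intro key _
  unfold Spec_generate_permutation
  have hperm : (PySem.List.sorted key.toList (fun x => x)).Perm key.toList :=
    PySem.List.sorted_perm key.toList (fun x => x) false
  have hpair : (PySem.List.sorted key.toList (fun x => x)).Pairwise (· ≤ ·) :=
    PySem.List.sorted_pairwise key.toList (fun x => x)
  have hlen : PySem.List.len key.toList = PySem.List.len (PySem.List.sorted key.toList (fun x => x)) := by
    rw [PySem.List.len_eq, PySem.List.len_eq, PySem.List.length_sorted]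
  have hinv : ∀ c ∈ key.toList,
      ((PySem.List.pyRange 0 (PySem.List.len key.toList)).foldl
        (fun m i =>
          let x := PySem.List.pyGetD (PySem.List.sorted key.toList (fun x => x)) i ' '
          if m.contains x then m.modify x [] (fun ixs => ixs ++ [i]) else m.insert x [i])
        (PySem.Dict.empty : PySem.Dict Char (List Int))).getD c []
      = PySem.List.pyRange ((key.toList.countP (fun x => decide (x < c)) : Int))
          ((key.toList.countP (fun x => decide (x < c)) : Int) + (key.toList.count c : Int)) := by
    intro c _
    rw [hlen, pv_loop1, pv_bucket _ hpair c,
      ← List.countP_eq_length_filter, hperm.countP_eq, hperm.count_eq]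
  have hA : generate_permutation key
      = pvMid (fun c => (key.toList.countP (fun x => decide (x < c)) : Int)) key.toList := by
    unfold generate_permutation
    rw [pv_loop2 key.toList _ [] _ hinv]
    simp
  have hB : generate_permutation_alt key
      = pvMid (fun c => (key.toList.countP (fun x => decide (x < c)) : Int)) key.toList := by
    have hcounts : ∀ c : Char,
        (key.toList.foldl (fun d x => d.insert x (d.getD x 0 + 1))
          (PySem.Dict.empty : PySem.Dict Char Int)).getD c 0 = (key.toList.count c : Int) := by
      intro c
      rw [PySem.Dict.getD_foldl_insert_add_one, PySem.Dict.getD_empty, zero_add]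
    have hkeys : (key.toList.foldl (fun d x => d.insert x (d.getD x 0 + 1))
        (PySem.Dict.empty : PySem.Dict Char Int)).keys = PySem.Set.ofList key.toList := by
      rw [PySem.Dict.keys_foldl_insert, PySem.Dict.keys_empty, PySem.Set.ofList_eq_foldl]
      rfl
    have hplt : (PySem.List.sorted ((key.toList.foldl (fun d x => d.insert x (d.getD x 0 + 1))
        (PySem.Dict.empty : PySem.Dict Char Int)).keys) (fun c => c)).Pairwise (· < ·) := by
      rw [hkeys]
      exact PySem.List.sorted_ofList_pairwise_lt key.toList
    have hmemks : ∀ x : Char, x ∈ (PySem.List.sorted ((key.toList.foldl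
        (fun d x => d.insert x (d.getD x 0 + 1))
        (PySem.Dict.empty : PySem.Dict Char Int)).keys) (fun c => c)) ↔ x ∈ key.toList := by
      intro x
      rw [hkeys, PySem.List.mem_sorted, PySem.Set.mem_ofList]
    have hnodks := hplt.imp (fun h => ne_of_lt h)
    have hstart : ∀ c ∈ key.toList,
        (((PySem.List.sorted ((key.toList.foldl (fun d x => d.insert x (d.getD x 0 + 1))
            (PySem.Dict.empty : PySem.Dict Char Int)).keys) (fun c => c)).foldl
          (fun (st : PySem.Dict Char Int × Int) c => (st.1.insert c st.2,
            st.2 + (key.toList.foldl (fun d x => d.insert x (d.getD x 0 + 1))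
              (PySem.Dict.empty : PySem.Dict Char Int)).getD c 0))
          (PySem.Dict.empty, 0)).1).getD c 0
        = (key.toList.countP (fun x => decide (x < c)) : Int) := by
      intro c hc
      rw [pv_start _ _ _ _ _ hplt ((hmemks c).mpr hc), zero_add,
        List.map_congr_left (fun x _ => hcounts x),
        pv_sum_counts _ key.toList (hnodks.filter _)]
      congr 1
      apply List.countP_congr
      intro x hx
      simp only [List.mem_filter, decide_eq_true_eq, hmemks x]
      constructor
      · rintro ⟨_, h2⟩; simpa using h2
      · intro h; exact ⟨hx, by simpa using h⟩
    have hinv3 : ∀ c ∈ key.toList,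
        (key.toList.foldl (fun d x => d.insert x (d.getD x 0 + 1))
          (PySem.Dict.empty : PySem.Dict Char Int)).getD c 0
          - (PySem.Dict.empty : PySem.Dict Char Int).getD c 0 = (key.toList.count c : Int) := by
      intro c _
      rw [hcounts, PySem.Dict.getD_empty, sub_zero]
    have h3 := pv_loop3
      (fun c => (((PySem.List.sorted ((key.toList.foldl (fun d x => d.insert x (d.getD x 0 + 1))
          (PySem.Dict.empty : PySem.Dict Char Int)).keys) (fun c => c)).foldl
        (fun (st : PySem.Dict Char Int × Int) c => (st.1.insert c st.2,
          st.2 + (key.toList.foldl (fun d x => d.insert x (d.getD x 0 + 1))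
            (PySem.Dict.empty : PySem.Dict Char Int)).getD c 0))
        (PySem.Dict.empty, 0)).1).getD c 0)
      (fun c => (key.toList.foldl (fun d x => d.insert x (d.getD x 0 + 1))
        (PySem.Dict.empty : PySem.Dict Char Int)).getD c 0)
      key.toList PySem.Dict.empty [] hinv3
    simp only [List.nil_append] at h3
    exact h3.trans (pvMid_congr _ _ key.toList hstart)
  rw [hA, hB]
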